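-- pv_equiv track=rewrite | github.com/SebastianLopez55/Code-Playground | Stacks_&_Queues/generate_binary_nums.py | find_bin
-- ===== SOURCE A (Python) =====
-- from collections import deque
--
-- class MyQueue:
--     def __init__(self):
--         self.queue = deque()
--
--     def enqueue(self, item):
--         self.queue.append(item)
--
--     def dequeue(self):
--         return self.queue.popleft()
--
-- def find_bin(number):
--     result = []
--     queue = MyQueue()
--     queue.enqueue("1")
--
--     for i in range(number):
--         result.append(queue.dequeue())
--         s1 = result[i] + "0"
--         s2 = result[i] + "1"
--         queue.enqueue(s1)
--         queue.enqueue(s2)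
--
--     return result  # For number = 3, result = {"1", "10", "11"}
-- ===== SOURCE B (Python) =====
-- def find_bin(number):
--     # Convert each i in 1..number to binary directly (divmod loop), no queue.
--     out = []
--     for i in range(1, number + 1):
--         s = ""
--         n = i
--         while n:
--             s = str(n % 2) + s
--             n //= 2
--         out.append(s)
--     return out
-- ===== Notes on version B (the rewrite author's own statement) =====
-- stated objective: idiomatic
-- what changed: Replaces the BFS queue that grows each binary string from its parent with a direct per-number binary conversion (divmod loop) over range(1, number+1).
import Mathlib
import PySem

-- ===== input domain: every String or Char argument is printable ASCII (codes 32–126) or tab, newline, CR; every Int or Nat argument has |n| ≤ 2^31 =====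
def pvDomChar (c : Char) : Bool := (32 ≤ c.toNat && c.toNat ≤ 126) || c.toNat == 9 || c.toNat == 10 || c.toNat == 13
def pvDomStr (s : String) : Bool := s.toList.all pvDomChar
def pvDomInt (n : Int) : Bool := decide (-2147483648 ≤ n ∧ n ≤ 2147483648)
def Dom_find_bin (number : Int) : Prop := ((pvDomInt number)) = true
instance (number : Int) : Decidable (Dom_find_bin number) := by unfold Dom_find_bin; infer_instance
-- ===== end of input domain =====

-- B replaces A's BFS queue (each string built from its parent) by a direct per-number
-- divmod conversion over range(1, number+1); same output, no queue (objective: idiomatic).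

-- ===== PORT A =====
-- the for-loop over range(number): fuel = loop count; state = (result, queue contents).
-- result[i] right after result.append(...) is exactly the dequeued element h.
def findBinLoopA : Nat → List String → List String → List String
  | 0, res, _ => res
  | n + 1, res, q =>
    match q with
    | [] => res  -- deque.popleft() on empty would raise; unreachable from find_bin's start state
    | h :: t => findBinLoopA n (res ++ [h]) (t ++ [h ++ "0", h ++ "1"])

def find_bin (number : Int) : List String :=
  findBinLoopA number.toNat [] ["1"]

-- ===== PORT B =====
-- the inner while-loop: s = str(n % 2) + s; n //= 2  (string built as its char list)
def binCharsLoop (n : Nat) (acc : List Char) : List Char :=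
  if h : n = 0 then acc
  else binCharsLoop (n / 2) ((if n % 2 = 1 then '1' else '0') :: acc)
  termination_by n
  decreasing_by exact Nat.div_lt_self (Nat.pos_of_ne_zero h) (by norm_num)

def find_bin_alt (number : Int) : List String :=
  (PySem.List.pyRange 1 (number + 1) 1).foldl
    (fun out i => out ++ [String.ofList (binCharsLoop i.toNat [])]) []

-- ===== PRECONDITION & SPEC =====
def Spec_find_bin (number : Int) (out : List String) : Prop := out = find_bin_alt number
instance (number : Int) (out : List String) : Decidable (Spec_find_bin number out) := by
  unfold Spec_find_bin; infer_instance

-- ===== CLAIM (what is proved, stated in full; the proofs are below) =====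
def Claim_equal_find_bin : Prop := ∀ (number : Int), Dom_find_bin number → Spec_find_bin number (find_bin number)

-- ===== LEMMAS AND PROOFS =====

-- the binary string of j, as a char list
def binS (j : Nat) : String := String.ofList (binCharsLoop j [])

theorem binCharsLoop_acc (n : Nat) : ∀ acc, binCharsLoop n acc = binCharsLoop n [] ++ acc := by
  induction n using Nat.strong_induction_on with
  | _ n ih =>
    intro acc
    by_cases h : n = 0
    · simp [binCharsLoop, h]
    · have hlt := Nat.div_lt_self (Nat.pos_of_ne_zero h) (show 1 < 2 by norm_num)
      conv_lhs => rw [binCharsLoop]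
      conv_rhs => rw [binCharsLoop]
      simp only [h, dite_false]
      rw [ih (n / 2) hlt ((if n % 2 = 1 then '1' else '0') :: acc),
          ih (n / 2) hlt [if n % 2 = 1 then '1' else '0']]
      simp

theorem binS_double (j : Nat) (hj : 1 ≤ j) : binS j ++ "0" = binS (2 * j) := by
  unfold binS
  rw [show ("0" : String) = String.ofList ['0'] from rfl, ← String.ofList_append]
  congr 1
  conv_rhs => rw [binCharsLoop]
  simp only [show 2 * j ≠ 0 by omega, dite_false]
  conv_rhs => rw [binCharsLoop_acc]
  have hd : 2 * j / 2 = j := by omega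
  have hm : 2 * j % 2 = 0 := by omega
  simp [hd, hm]

theorem binS_double_succ (j : Nat) (hj : 1 ≤ j) : binS j ++ "1" = binS (2 * j + 1) := by
  unfold binS
  rw [show ("1" : String) = String.ofList ['1'] from rfl, ← String.ofList_append]
  congr 1
  conv_rhs => rw [binCharsLoop]
  simp only [show 2 * j + 1 ≠ 0 by omega, dite_false]
  conv_rhs => rw [binCharsLoop_acc]
  have hd : (2 * j + 1) / 2 = j := by omega
  have hm : (2 * j + 1) % 2 = 1 := by omega
  simp [hd, hm]

theorem loopA_inv (n : Nat) : ∀ k : Nat,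
    findBinLoopA n ((List.range' 1 k).map binS) ((List.range' (k + 1) (k + 1)).map binS)
      = (List.range' 1 (k + n)).map binS := by
  induction n with
  | zero => intro k; simp [findBinLoopA]
  | succ n ih =>
    intro k
    rw [List.range'_succ, List.map_cons, findBinLoopA]
    have h1 : (List.range' 1 k).map binS ++ [binS (k + 1)] = (List.range' 1 (k + 1)).map binS := by
      rw [List.range'_1_concat]; simp [Nat.add_comm 1 k]
    have h2 : (List.range' (k + 1 + 1) k).map binS ++ [binS (k + 1) ++ "0", binS (k + 1) ++ "1"]
        = (List.range' (k + 1 + 1) (k + 1 + 1)).map binS := by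
      rw [binS_double (k + 1) (by omega), binS_double_succ (k + 1) (by omega),
          List.range'_1_concat, List.range'_1_concat]
      rw [show k + 1 + 1 + k = 2 * (k + 1) from by omega,
          show k + 1 + 1 + (k + 1) = 2 * (k + 1) + 1 from by omega]
      simp
    rw [h1, h2, ih (k + 1)]
    congr 2
    omega

theorem find_bin_eq_map (number : Int) :
    find_bin number = (List.range' 1 number.toNat).map binS := by
  have h := loopA_inv number.toNat 0
  simpa [find_bin, List.range', binS, binCharsLoop] using h

theorem find_bin_alt_eq_map (number : Int) :
    find_bin_alt number = (List.range' 1 number.toNat).map binS := by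
  unfold find_bin_alt
  rw [PySem.List.foldl_append_singleton_eq_map, PySem.List.pyRange_one, List.map_map,
      List.range'_eq_map_range, List.map_map]
  have hlen : (number + 1 - 1).toNat = number.toNat := by omega
  rw [hlen]
  apply List.map_congr_left
  intro k hk
  simp only [Function.comp_apply, binS]
  congr 2

-- ===== VERDICT (by name: the statement is the Claim_ definition above) =====
theorem find_bin_spec : Claim_equal_find_bin := by
  intro number _
  unfold Spec_find_bin
  rw [find_bin_eq_map, find_bin_alt_eq_map]
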